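-- pv_equiv track=rewrite | github.com/mqtrinh/mqtrinh.github.io | math/research/code/jacobian-factors_50.py | is_basis
-- ===== SOURCE A (Python) =====
-- def is_basis(Y, m):
--     remainders = set()
--     for y in Y:
--         rem = y % m
--         if rem in remainders:
--             return False
--         else:
--             remainders.add(rem)
--     return True
-- ===== SOURCE B (Python) =====
-- def is_basis(Y, m):
--     rems = sorted(y % m for y in Y)
--     return all(a != b for a, b in zip(rems, rems[1:]))
-- ===== Notes on version B (the rewrite author's own statement) =====
-- stated objective: alternative
-- what changed: Replaces the hash-set membership early-exit loop with sort-then-adjacent-compare duplicate detection on the list of remainders.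
import Mathlib
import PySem

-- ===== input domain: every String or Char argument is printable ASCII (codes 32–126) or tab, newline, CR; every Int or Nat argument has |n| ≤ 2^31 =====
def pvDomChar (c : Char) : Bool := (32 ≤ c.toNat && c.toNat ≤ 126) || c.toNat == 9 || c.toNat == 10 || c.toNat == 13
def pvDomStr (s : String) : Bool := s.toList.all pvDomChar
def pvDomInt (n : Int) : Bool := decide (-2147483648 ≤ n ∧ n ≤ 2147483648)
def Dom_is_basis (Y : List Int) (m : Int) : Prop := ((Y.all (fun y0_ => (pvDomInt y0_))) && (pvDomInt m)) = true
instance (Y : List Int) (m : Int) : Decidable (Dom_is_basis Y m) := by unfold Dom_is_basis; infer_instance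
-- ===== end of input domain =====

-- B replaces A's hash-set early-exit pass with sort-then-adjacent-compare duplicate detection (alternative decomposition, not claimed faster).

-- ===== PORT A =====
-- the for-loop with early 'return False', carrying the 'remainders' set
def is_basis_loop (m : Int) (remainders : PySem.Set Int) : List Int → Bool
  | [] => true
  | y :: ys =>
    let rem := PySem.Int.mod y m
    if PySem.Set.contains remainders rem then false
    else is_basis_loop m (PySem.Set.add remainders rem) ys

def is_basis (Y : List Int) (m : Int) : Bool :=
  is_basis_loop m PySem.Set.empty Y

-- ===== PORT B =====
def is_basis_alt (Y : List Int) (m : Int) : Bool :=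
  let rems := PySem.List.sorted (Y.map (fun y => PySem.Int.mod y m)) (fun x => x) false
  (rems.zip rems.tail).all (fun p => decide (p.1 ≠ p.2))

-- ===== PRECONDITION & SPEC =====
-- Pre_ excludes exactly the inputs where Python raises ZeroDivisionError (m == 0 with nonempty Y); B raises there too.
def Pre_is_basis (Y : List Int) (m : Int) : Prop := Y = [] ∨ m ≠ 0
instance (Y : List Int) (m : Int) : Decidable (Pre_is_basis Y m) := by unfold Pre_is_basis; infer_instance
def pvWitness_is_basis : List Int × Int := ([1, 2, 4], 3)
def Spec_is_basis (Y : List Int) (m : Int) (out : Bool) : Prop := out = is_basis_alt Y m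
instance (Y : List Int) (m : Int) (out : Bool) : Decidable (Spec_is_basis Y m out) := by unfold Spec_is_basis; infer_instance

-- ===== CLAIM (what is proved, stated in full; the proofs are below) =====
def Claim_equal_is_basis : Prop := ∀ (Y : List Int) (m : Int), Dom_is_basis Y m → Pre_is_basis Y m → Spec_is_basis Y m (is_basis Y m)

-- ===== LEMMAS AND PROOFS =====

-- A's loop returns true iff the remainders of the suffix are pairwise distinct and avoid the set so far
theorem is_basis_loop_iff (m : Int) (s : PySem.Set Int) (ys : List Int) :
    is_basis_loop m s ys = true ↔
      ((ys.map (fun y => PySem.Int.mod y m)).Nodup ∧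
        ∀ r ∈ ys.map (fun y => PySem.Int.mod y m), r ∉ s) := by
  induction ys generalizing s with
  | nil => simp [is_basis_loop]
  | cons y ys ih =>
    simp only [is_basis_loop, List.map_cons, List.nodup_cons, List.mem_cons]
    by_cases h : PySem.Set.contains s (PySem.Int.mod y m) = true
    · have hm : PySem.Int.mod y m ∈ s := (PySem.Set.contains_iff s _).mp h
      simp only [h, if_true, Bool.false_eq_true, false_iff]
      rintro ⟨_, hall⟩
      exact (hall _ (Or.inl rfl)) hm
    · have hm : PySem.Int.mod y m ∉ s := fun hx => h ((PySem.Set.contains_iff s _).mpr hx)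
      simp only [Bool.not_eq_true] at h
      simp only [h, Bool.false_eq_true, if_false]
      rw [ih]
      simp only [PySem.Set.mem_add]
      constructor
      · rintro ⟨hnd, hall⟩
        refine ⟨⟨fun hmem => hall _ hmem (Or.inr rfl), hnd⟩, ?_⟩
        rintro r (rfl | hr)
        · exact hm
        · exact fun hrs => hall r hr (Or.inl hrs)
      · rintro ⟨⟨hy, hnd⟩, hall⟩
        refine ⟨hnd, ?_⟩
        rintro r hr (hrs | rfl)
        · exact hall r (Or.inr hr) hrs
        · exact hy hr

theorem is_basis_iff (Y : List Int) (m : Int) :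
    is_basis Y m = true ↔ (Y.map (fun y => PySem.Int.mod y m)).Nodup := by
  rw [is_basis, is_basis_loop_iff]
  simp [PySem.Set.empty]

-- the adjacent-pair check is the "no two consecutive entries equal" chain
theorem zip_tail_all_ne (l : List Int) :
    ((l.zip l.tail).all (fun p => decide (p.1 ≠ p.2))) = true ↔ List.IsChain (· ≠ ·) l := by
  induction l with
  | nil => simp
  | cons a l ih =>
    cases l with
    | nil => simp
    | cons b t =>
      rw [List.isChain_cons_cons, ← ih]
      simp

-- on a ≤-sorted list, adjacent-distinct ⇔ nodup
theorem chain_ne_iff_nodup (l : List Int) (hs : l.Pairwise (· ≤ ·)) :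
    List.IsChain (· ≠ ·) l ↔ l.Nodup := by
  induction l with
  | nil => simp
  | cons a l ih =>
    rcases List.pairwise_cons.mp hs with ⟨ha, hl⟩
    rw [List.isChain_cons, List.nodup_cons, ih hl]
    constructor
    · rintro ⟨hhd, hch⟩
      refine ⟨fun hmem => ?_, hch⟩
      rcases l with _ | ⟨b, t⟩
      · simp at hmem
      · have hab : a ≠ b := by simpa using hhd b rfl
        have hle : a ≤ b := ha b (by simp)
        rcases List.mem_cons.mp hmem with rfl | hat
        · exact hab rfl
        · have hba : b ≤ a := (List.pairwise_cons.mp hl).1 a hat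
          exact hab (le_antisymm hle hba)
    · rintro ⟨hnm, hch⟩
      refine ⟨fun b hb hab => hnm ?_, hch⟩
      rw [hab]
      exact List.mem_of_mem_head? hb

theorem is_basis_alt_iff (Y : List Int) (m : Int) :
    is_basis_alt Y m = true ↔ (Y.map (fun y => PySem.Int.mod y m)).Nodup := by
  rw [is_basis_alt]
  have hperm := PySem.List.sorted_perm (xs := Y.map (fun y => PySem.Int.mod y m))
    (key := fun x => x) (rev := false)
  have hpw := PySem.List.sorted_pairwise (xs := Y.map (fun y => PySem.Int.mod y m))
    (key := fun x => x)
  rw [zip_tail_all_ne, chain_ne_iff_nodup _ hpw]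
  exact hperm.nodup_iff

-- ===== VERDICT (by name: the statement is the Claim_ definition above) =====
theorem is_basis_spec : Claim_equal_is_basis := by
  intro Y m _ _
  unfold Spec_is_basis
  rcases hA : is_basis Y m with _ | _
  · rcases hB : is_basis_alt Y m with _ | _
    · rfl
    · exact absurd (hA ▸ (is_basis_iff Y m).mpr ((is_basis_alt_iff Y m).mp hB)) (by simp)
  · exact ((is_basis_alt_iff Y m).mpr ((is_basis_iff Y m).mp hA)).symm
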